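-- pv_equiv track=rewrite | github.com/guyi66/insight-research-room | message_analysis_agent.py | _format_web_items_for_prompt
-- ===== SOURCE A (Python) =====
-- from typing import Any, Dict, Iterable, List, Optional, Sequence, Tuple
--
-- def _format_web_items_for_prompt(items: Sequence[Dict[str, str]], max_chars: int) -> str:
--     if not items:
--         return ""
--     lines = []
--     total = 0
--     for i, it in enumerate(items, 1):
--         title = (it.get("title") or "").strip()
--         snippet = (it.get("snippet") or "").strip()
--         url = (it.get("url") or "").strip()
--         row = f"{i}. {title} | {snippet} | {url}"
--         total += len(row)
--         if total > max_chars: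
--             break
--         lines.append(row)
--     return "\n".join(lines)
-- ===== SOURCE B (Python) =====
-- from typing import Any, Dict, Iterable, List, Optional, Sequence, Tuple
--
--
-- def _row(i, it):
--     def g(k):
--         return (it.get(k) or "").strip()
--     return f"{i}. {g('title')} | {g('snippet')} | {g('url')}"
--
--
-- def _format_web_items_for_prompt(items: Sequence[Dict[str, str]], max_chars: int) -> str:
--     # Pass 1: format every item into its row.
--     rows = [_row(i, it) for i, it in enumerate(items, 1)]
--     # Pass 2: cumulative lengths of the rows (newlines not counted, as in A).
--     cums = []
--     t = 0
--     for r in rows: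
--         t += len(r)
--         cums.append(t)
--     # Pass 3: keep exactly the rows whose cumulative length fits the budget.
--     # Cumulative sums are nondecreasing, so this equals stopping at the first overflow.
--     kept = [r for r, c in zip(rows, cums) if c <= max_chars]
--     return "\n".join(kept)
-- ===== Notes on version B (the rewrite author's own statement) =====
-- stated objective: alternative
-- what changed: Replaces A's single interleaved loop (format + running total + conditional append + break) with three independent passes: map every item to its row, compute the cumulative row lengths, then keep exactly the rows whose cumulative length fits the budget (correct because cumulative sums are nondecreasing, so skip-and-keep equals stop-at-first-overflow).
import Mathlib
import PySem

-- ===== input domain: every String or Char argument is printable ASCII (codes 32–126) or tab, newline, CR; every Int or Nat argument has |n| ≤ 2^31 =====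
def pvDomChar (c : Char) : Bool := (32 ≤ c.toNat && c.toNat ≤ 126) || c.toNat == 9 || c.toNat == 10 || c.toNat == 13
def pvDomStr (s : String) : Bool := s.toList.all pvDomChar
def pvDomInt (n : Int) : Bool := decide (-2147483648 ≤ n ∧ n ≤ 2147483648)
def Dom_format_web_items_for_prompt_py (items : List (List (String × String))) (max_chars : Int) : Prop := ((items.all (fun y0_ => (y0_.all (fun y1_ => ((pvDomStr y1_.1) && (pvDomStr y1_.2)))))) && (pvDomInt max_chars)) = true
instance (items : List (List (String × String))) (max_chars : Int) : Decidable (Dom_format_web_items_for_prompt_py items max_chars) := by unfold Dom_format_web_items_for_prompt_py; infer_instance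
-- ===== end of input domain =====

-- B re-decomposes A's single break-loop into three passes (format all rows, cumulative lengths,
-- keep the rows whose cumulative length fits); same cost, no behaviour change.

-- ===== PORT A =====
-- dict.get(k) or "" : first match in the association list, defaulting to ""
def pvGetA (it : List (String × String)) (k : String) : String :=
  ((it.find? (fun p => p.1 == k)).map (fun p => p.2)).getD ""

-- the f-string row, on code-point lists (exact: Python str concatenation/len are code-point-wise)
def pvRowA (i : Int) (it : List (String × String)) : List Char :=
  let title := PySem.Chars.strip (pvGetA it "title").toList
  let snippet := PySem.Chars.strip (pvGetA it "snippet").toList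
  let url := PySem.Chars.strip (pvGetA it "url").toList
  PySem.Int.toChars i ++ ". ".toList ++ title ++ " | ".toList ++ snippet ++ " | ".toList ++ url

-- A's loop: running total, conditional append, break at the first overflow
def pvLoopA (max_chars : Int) : List (List (String × String)) → Int → Int → List (List Char) → List (List Char)
  | [], _, _, lines => lines
  | it :: rest, i, total, lines =>
    let row := pvRowA i it
    let total' := total + (row.length : Int)
    if total' > max_chars then lines
    else pvLoopA max_chars rest (i + 1) total' (lines ++ [row])

def format_web_items_for_prompt_py (items : List (List (String × String))) (max_chars : Int) : String :=
  if items = [] then ""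
  else String.ofList (PySem.Chars.join ['\n'] (pvLoopA max_chars items 1 0 []))

-- ===== PORT B =====
-- helper g(k) of _row: lookup, default "", strip
def pvG (it : List (String × String)) (k : String) : List Char :=
  PySem.Chars.strip (((it.find? (fun p => p.1 == k)).map Prod.snd).getD "").toList

def pvRowB (i : Int) (it : List (String × String)) : List Char :=
  PySem.Int.toChars i ++ ". ".toList ++ pvG it "title" ++ " | ".toList ++ pvG it "snippet" ++ " | ".toList ++ pvG it "url"

def format_web_items_for_prompt_py_alt (items : List (List (String × String))) (max_chars : Int) : String :=
  -- pass 1: all rows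
  let rows := (PySem.List.enumerate items 1).map (fun p => pvRowB p.1 p.2)
  -- pass 2: cumulative row lengths
  let cums := (rows.foldl (fun (acc : List Int × Int) r =>
    let t := acc.2 + (r.length : Int); (acc.1 ++ [t], t)) ([], 0)).1
  -- pass 3: keep the rows whose cumulative length fits the budget
  let kept := ((rows.zip cums).filter (fun rc => decide (rc.2 ≤ max_chars))).map Prod.fst
  String.ofList (PySem.Chars.join ['\n'] kept)

-- ===== PRECONDITION & SPEC =====
def Spec_format_web_items_for_prompt_py (items : List (List (String × String))) (max_chars : Int) (out : String) : Prop := out = format_web_items_for_prompt_py_alt items max_chars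
instance (items : List (List (String × String))) (max_chars : Int) (out : String) : Decidable (Spec_format_web_items_for_prompt_py items max_chars out) := by unfold Spec_format_web_items_for_prompt_py; infer_instance

-- ===== CLAIM (what is proved, stated in full; the proofs are below) =====
def Claim_equal_format_web_items_for_prompt_py : Prop := ∀ (items : List (List (String × String))) (max_chars : Int), Dom_format_web_items_for_prompt_py items max_chars → Spec_format_web_items_for_prompt_py items max_chars (format_web_items_for_prompt_py items max_chars)

-- ===== LEMMAS AND PROOFS =====

-- cumulative lengths, recursively
def pvCums : List (List Char) → Int → List Int
  | [], _ => []
  | r :: rs, t => (t + (r.length : Int)) :: pvCums rs (t + (r.length : Int))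

-- the selected prefix: stop at the first overflow
def pvSel (mc : Int) : List (List Char) → Int → List (List Char)
  | [], _ => []
  | r :: rs, t => if t + (r.length : Int) > mc then [] else r :: pvSel mc rs (t + (r.length : Int))

theorem pvRow_eq (i : Int) (it : List (String × String)) : pvRowA i it = pvRowB i it := rfl

theorem pvLoopA_eq (mc : Int) (items : List (List (String × String))) :
    ∀ (i t : Int) (acc : List (List Char)),
    pvLoopA mc items i t acc =
      acc ++ pvSel mc ((PySem.List.enumerate items i).map (fun p => pvRowB p.1 p.2)) t := by
  induction items with
  | nil => intro i t acc; simp [pvLoopA, PySem.List.enumerate, pvSel]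
  | cons it rest ih =>
    intro i t acc
    rw [PySem.List.enumerate_cons]
    simp only [pvLoopA, List.map_cons, pvSel, pvRow_eq]
    split_ifs with h
    · simp
    · rw [ih]; simp

-- the loop's final running total
def pvTot : List (List Char) → Int → Int
  | [], t => t
  | r :: rs, t => pvTot rs (t + (r.length : Int))

theorem pvCums_foldl (rows : List (List Char)) :
    ∀ (acc : List Int) (t : Int),
    rows.foldl (fun (acc : List Int × Int) r =>
      (acc.1 ++ [acc.2 + (r.length : Int)], acc.2 + (r.length : Int))) (acc, t) =
      (acc ++ pvCums rows t, pvTot rows t) := by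
  induction rows with
  | nil => intro acc t; simp [pvCums, pvTot]
  | cons r rs ih =>
    intro acc t
    simp only [List.foldl_cons, pvCums, pvTot]
    rw [ih]
    simp

theorem pvKept_nil (mc : Int) (rows : List (List Char)) :
    ∀ t : Int, mc < t →
    ((rows.zip (pvCums rows t)).filter (fun rc => decide (rc.2 ≤ mc))).map Prod.fst = [] := by
  induction rows with
  | nil => intro t _; simp [pvCums]
  | cons r rs ih =>
    intro t ht
    have h1 : ¬ (t + (r.length : Int) ≤ mc) := by
      have : (0:Int) ≤ (r.length : Int) := Int.natCast_nonneg _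
      omega
    simp only [pvCums, List.zip_cons_cons, List.filter_cons, decide_eq_true_eq]
    rw [if_neg h1]
    exact ih _ (by have : (0:Int) ≤ (r.length : Int) := Int.natCast_nonneg _; omega)

theorem pvKept_eq (mc : Int) (rows : List (List Char)) :
    ∀ t : Int,
    ((rows.zip (pvCums rows t)).filter (fun rc => decide (rc.2 ≤ mc))).map Prod.fst =
      pvSel mc rows t := by
  induction rows with
  | nil => intro t; simp [pvCums, pvSel]
  | cons r rs ih =>
    intro t
    simp only [pvCums, pvSel, List.zip_cons_cons, List.filter_cons, decide_eq_true_eq]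
    by_cases h : t + (r.length : Int) ≤ mc
    · rw [if_pos h, if_neg (by omega)]
      simp only [List.map_cons, ih]
    · rw [if_neg h, if_pos (by omega)]
      exact pvKept_nil mc rs _ (by omega)

-- ===== VERDICT (by name: the statement is the Claim_ definition above) =====
theorem format_web_items_for_prompt_py_spec : Claim_equal_format_web_items_for_prompt_py := by
  intro items max_chars _
  unfold Spec_format_web_items_for_prompt_py format_web_items_for_prompt_py format_web_items_for_prompt_py_alt
  dsimp only
  rw [pvCums_foldl, List.nil_append, pvKept_eq]
  cases items with
  | nil => simp [PySem.List.enumerate, pvSel, PySem.Chars.join, List.intercalate]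
  | cons it rest =>
    rw [if_neg (by simp)]
    rw [pvLoopA_eq, List.nil_append]
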